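-- pv_equiv track=rewrite | github.com/VladimirovMaxim/Python-Hometasks | 4/Task_5.py | get_monomial
-- ===== SOURCE A (Python) =====
-- def get_monomial(line):
--     tmp = []
--     last = 0
--     positive = True
--     for i, item in enumerate(line):
--         if item in {"+", "-"}:
--             if positive:
--                 tmp.append(line[last:i])
--             else:
--                 tmp.append("-" + line[last:i])
--             last = i+1
--             positive = item == "+"
--     if positive:
--         tmp.append(line[last:])
--     else:
--         tmp.append("-" + line[last:])
--     return tmp
-- ===== SOURCE B (Python) =====
-- def get_monomial(line):
--     return line.replace("-", "+-").split("+")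
-- ===== Notes on version B (the rewrite author's own statement) =====
-- stated objective: simpler
-- what changed: Replaced the index-tracking loop with its sign flag and manual slicing by two library calls: insert a plus sign before every minus sign, then split on plus signs.
import Mathlib
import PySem

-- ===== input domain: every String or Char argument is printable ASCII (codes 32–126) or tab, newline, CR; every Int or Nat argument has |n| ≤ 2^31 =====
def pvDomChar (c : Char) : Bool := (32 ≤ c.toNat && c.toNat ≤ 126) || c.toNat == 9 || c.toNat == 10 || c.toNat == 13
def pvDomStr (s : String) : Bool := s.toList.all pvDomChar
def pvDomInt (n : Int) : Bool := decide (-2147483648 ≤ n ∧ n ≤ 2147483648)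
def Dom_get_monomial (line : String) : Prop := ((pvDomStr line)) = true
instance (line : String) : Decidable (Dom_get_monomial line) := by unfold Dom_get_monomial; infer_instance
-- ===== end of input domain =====

set_option maxRecDepth 8000


-- B replaces A's index-tracking loop with sign flag by two library calls ("+" before each "-", then split on "+"); objective: simpler.

-- ===== PORT A =====
-- loop body of A's for-loop (state: tmp, last, positive)
def stepA (line : String) (st : List String × Int × Bool) (p : Int × Char) : List String × Int × Bool :=
  if p.2 == '+' || p.2 == '-' then
    ((if st.2.2 then st.1 ++ [PySem.Str.slice line (some st.2.1) (some p.1)]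
      else st.1 ++ ["-" ++ PySem.Str.slice line (some st.2.1) (some p.1)]), p.1 + 1, p.2 == '+')
  else st

-- A's trailing append after the loop
def finalizeA (line : String) (st : List String × Int × Bool) : List String :=
  if st.2.2 then st.1 ++ [PySem.Str.slice line (some st.2.1) none]
  else st.1 ++ ["-" ++ PySem.Str.slice line (some st.2.1) none]

def get_monomial (line : String) : List String :=
  finalizeA line ((PySem.List.enumerate line.toList 0).foldl (stepA line) ([], 0, true))

-- ===== PORT B =====
def get_monomial_alt (line : String) : List String :=
  (PySem.Str.split? (PySem.Str.replace line "-" "+-") "+").getD []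

-- ===== PRECONDITION & SPEC =====
def Spec_get_monomial (line : String) (out : List String) : Prop := out = get_monomial_alt line
instance (line : String) (out : List String) : Decidable (Spec_get_monomial line out) := by unfold Spec_get_monomial; infer_instance

-- ===== CLAIM (what is proved, stated in full; the proofs are below) =====
def Claim_equal_get_monomial : Prop := ∀ (line : String), Dom_get_monomial line → Spec_get_monomial line (get_monomial line)

-- ===== LEMMAS AND PROOFS =====

-- the token currently being accumulated, with its sign
def pvTok (pos : Bool) (cur : List Char) : String :=
  if pos then String.ofList cur else String.ofList ('-' :: cur)

-- common recursive characterisation of both programs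
def pvMono (pos : Bool) (cur : List Char) : List Char → List String
  | [] => [pvTok pos cur]
  | c :: rest =>
      if c = '+' then pvTok pos cur :: pvMono true [] rest
      else if c = '-' then pvTok pos cur :: pvMono false [] rest
      else pvMono pos (cur ++ [c]) rest

def pvF (c : Char) : List Char := if c = '-' then ['+', '-'] else [c]

def pvSplit1 (cur : List Char) : List Char → List (List Char)
  | [] => [cur]
  | c :: rest => if c = '+' then cur :: pvSplit1 [] rest else pvSplit1 (cur ++ [c]) rest

theorem pv_replace_go (l : List Char) : ∀ (fuel : Nat) (acc : List Char), l.length ≤ fuel →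
    PySem.Chars.replace.go ['-'] ['+', '-'] fuel l acc = acc.reverse ++ l.flatMap pvF := by
  induction l with
  | nil =>
    intro fuel acc _
    cases fuel <;> simp [PySem.Chars.replace.go]
  | cons c t ih =>
    intro fuel acc h
    cases fuel with
    | zero => simp at h
    | succ f =>
      by_cases hc : c = '-'
      · subst hc
        simp only [PySem.Chars.replace.go, List.isPrefixOf, beq_self_eq_true, Bool.true_and,
          List.isPrefixOf_nil_left, if_true]
        rw [show List.drop (['-'] : List Char).length ('-' :: t) = t from rfl,
          ih f _ (by simp at h; omega)]
        simp [pvF]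
      · have hpre : (['-'].isPrefixOf (c :: t)) = false := by
          simp [List.isPrefixOf]; exact fun h => absurd h.symm hc
        simp only [PySem.Chars.replace.go, hpre, Bool.false_eq_true, if_false]
        rw [ih f _ (by simp at h; omega)]
        simp [pvF, hc]
theorem pv_replace (s : List Char) :
    PySem.Chars.replace s ['-'] ['+', '-'] = s.flatMap pvF := by
  simp only [PySem.Chars.replace, List.isEmpty_cons, Bool.false_eq_true, if_neg, ite_false]
  simpa using pv_replace_go s s.length [] le_rfl

theorem pv_splitOn_go (l : List Char) : ∀ (fuel : Nat) (cur : List Char) (acc : List (List Char)),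
    l.length ≤ fuel →
    PySem.Chars.splitOn.go ['+'] fuel l cur acc = acc.reverse ++ pvSplit1 cur.reverse l := by
  induction l with
  | nil =>
    intro fuel cur acc _
    cases fuel <;> simp [PySem.Chars.splitOn.go, pvSplit1]
  | cons c t ih =>
    intro fuel cur acc h
    cases fuel with
    | zero => simp at h
    | succ f =>
      by_cases hc : c = '+'
      · subst hc
        simp only [PySem.Chars.splitOn.go, List.isPrefixOf, beq_self_eq_true, Bool.true_and,
          List.isPrefixOf_nil_left, if_true]
        rw [show List.drop (['+'] : List Char).length ('+' :: t) = t from rfl,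
          ih f [] _ (by simp at h; omega)]
        simp [pvSplit1]
      · have hpre : (['+'].isPrefixOf (c :: t)) = false := by
          simp [List.isPrefixOf]; exact fun h => absurd h.symm hc
        simp only [PySem.Chars.splitOn.go, hpre, Bool.false_eq_true, if_false]
        rw [ih f (c :: cur) _ (by simp at h; omega)]
        simp [pvSplit1, hc]
theorem pv_splitOn (s : List Char) :
    PySem.Chars.splitOn s ['+'] = pvSplit1 [] s := by
  simpa using pv_splitOn_go s (s.length + 1) [] [] (by omega)

theorem pv_split1_flat (l : List Char) : ∀ (pos : Bool) (cur : List Char),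
    (pvSplit1 (if pos then cur else '-' :: cur) (l.flatMap pvF)).map String.ofList
      = pvMono pos cur l := by
  induction l with
  | nil =>
    intro pos cur
    cases pos <;> simp [pvSplit1, pvMono, pvTok]
  | cons c t ih =>
    intro pos cur
    by_cases hp : c = '+'
    · subst hp
      have h1 := ih true []
      simp only [ite_true] at h1
      cases pos <;> simp [pvF, pvSplit1, pvMono, pvTok, h1]
    · by_cases hm : c = '-'
      · subst hm
        have h1 := ih false []
        simp only [ite_false, Bool.false_eq_true] at h1
        cases pos <;> simp [pvF, pvSplit1, pvMono, pvTok, h1]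
      · have h1 := ih pos (cur ++ [c])
        cases pos
        · simp only [ite_false, Bool.false_eq_true] at h1
          simp [pvF, pvSplit1, pvMono, hp, hm, h1]
        · simp only [ite_true] at h1
          simp [pvF, pvSplit1, pvMono, hp, hm, h1]

theorem pv_alt_eq (line : String) :
    get_monomial_alt line = pvMono true [] line.toList := by
  have h1 : (PySem.Str.replace line "-" "+-").toList
      = line.toList.flatMap pvF := by
    rw [PySem.Str.toList_replace]
    have : ("-" : String).toList = ['-'] := by decide
    have h2 : ("+-" : String).toList = ['+', '-'] := by decide
    rw [this, h2, pv_replace]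
  simp only [get_monomial_alt, PySem.Str.split?]
  have hsep : ("+" : String).toList = ['+'] := by decide
  rw [hsep]
  simp only [PySem.Chars.split?, List.isEmpty_cons, Bool.false_eq_true, ite_false, Option.map_some,
    Option.getD_some]
  rw [h1, pv_splitOn]
  have := pv_split1_flat line.toList true []
  simpa using this

-- A side

theorem pv_loopA (line : String) (l : List Char) : ∀ (k last : Nat) (tmp : List String) (pos : Bool),
    l = line.toList.drop k → last ≤ k →
    finalizeA line ((PySem.List.enumerate l (k : Int)).foldl (stepA line) (tmp, (last : Int), pos))
      = tmp ++ pvMono pos ((line.toList.drop last).take (k - last)) l := by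
  induction l with
  | nil =>
    intro k last tmp pos hl hle
    have hlen : line.toList.length ≤ k := by
      by_contra h
      have := List.drop_eq_nil_iff.mp hl.symm
      omega
    have htake : (line.toList.drop last).take (k - last) = line.toList.drop last := by
      apply List.take_of_length_le
      have : line.length = line.toList.length := by simp
      simp only [List.length_drop]
      omega
    have hfrom : PySem.Str.slice line (some (last : Int)) none
        = String.ofList (line.toList.drop last) := by
      rw [← String.toList_inj]
      simp [PySem.Str.toList_slice, PySem.List.slice_from_natCast]
    have hminus : ("-" ++ String.ofList (line.toList.drop last))
        = String.ofList ('-' :: line.toList.drop last) := by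
      rw [← String.toList_inj]; simp
    simp only [PySem.List.enumerate_nil, List.foldl_nil, finalizeA, pvMono, htake, pvTok, hfrom,
      hminus]
    cases pos <;> simp
  | cons c rest ih =>
    intro k last tmp pos hl hle
    have hget : line.toList[k]? = some c := by
      have := congrArg (fun xs => xs.head?) hl
      simpa [List.head?_drop] using this.symm
    have hrest : rest = line.toList.drop (k + 1) := by
      have := congrArg List.tail hl
      simpa [List.tail_drop] using this
    rw [PySem.List.enumerate_cons, List.foldl_cons]
    by_cases hsign : c = '+' ∨ c = '-'
    · have hb : (c == '+' || c == '-') = true := by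
        rcases hsign with h | h <;> simp [h]
      have hslice : PySem.Str.slice line (some (last : Int)) (some (k : Int))
          = String.ofList ((line.toList.drop last).take (k - last)) := by
        rw [← String.toList_inj]
        simp only [PySem.Str.toList_slice, PySem.Chars.slice_eq_listSlice,
          PySem.List.slice_natCast]
        simp
      have hminus : ("-" ++ String.ofList ((line.toList.drop last).take (k - last)))
          = String.ofList ('-' :: (line.toList.drop last).take (k - last)) := by
        rw [← String.toList_inj]; simp
      have hcast : ((k : Int) + 1) = (((k + 1 : Nat)) : Int) := by push_cast; ring
      have hstep : stepA line (tmp, (last : Int), pos) ((k : Int), c)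
          = (tmp ++ [pvTok pos ((line.toList.drop last).take (k - last))],
             (k : Int) + 1, (c == '+')) := by
        cases pos
        · simp [stepA, hb, hslice, pvTok, hminus]
        · simp [stepA, hb, hslice, pvTok]
      rw [hstep, hcast, ih (k + 1) (k + 1) _ (c == '+') hrest le_rfl]
      rcases hsign with h | h <;> subst h <;>
        simp [pvMono, List.append_assoc]
    · have hb : (c == '+' || c == '-') = false := by
        push_neg at hsign
        simp [hsign.1, hsign.2]
      have hstep : stepA line (tmp, (last : Int), pos) ((k : Int), c) = (tmp, (last : Int), pos) := by
        simp [stepA, hb]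
      have hcast : ((k : Int) + 1) = (((k + 1 : Nat)) : Int) := by push_cast; ring
      rw [hstep, hcast, ih (k + 1) last tmp pos hrest (by omega)]
      have htake : (line.toList.drop last).take (k + 1 - last)
          = (line.toList.drop last).take (k - last) ++ [c] := by
        have h1 : k + 1 - last = (k - last) + 1 := by omega
        rw [h1, List.take_succ]
        congr 1
        have h2 : (line.toList.drop last)[k - last]? = line.toList[last + (k - last)]? := by
          simp [List.getElem?_drop]
        rw [h2, show last + (k - last) = k by omega, hget]
        rfl
      push_neg at hsign
      rw [htake]
      simp [pvMono, hsign.1, hsign.2]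

theorem pv_a_eq (line : String) :
    get_monomial line = pvMono true [] line.toList := by
  have := pv_loopA line line.toList 0 0 [] true (by simp) le_rfl
  simpa using this

-- ===== VERDICT (by name: the statement is the Claim_ definition above) =====
theorem get_monomial_spec : Claim_equal_get_monomial := by
  intro line _
  unfold Spec_get_monomial
  rw [pv_a_eq, pv_alt_eq]
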